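-- pv_equiv track=rewrite | github.com/develixtechmain/cardinal-bot | trace_service/models.py | compute_summary_from_events
-- ===== SOURCE A (Python) =====
-- def compute_summary_from_events(events: list[dict]) -> str:
--     if not events:
--         return "No events"
--     errors = [e for e in events if e.get("status") == "error"]
--     if errors:
--         last = errors[-1]
--         return f"Error at {last.get('service')}/{last.get('stage')}"
--     stages = [f"{e.get('service')}/{e.get('stage')}" for e in events[-3:]]
--     return " → ".join(stages)
-- ===== SOURCE B (Python) =====
-- def compute_summary_from_events(events: list[dict]) -> str:
--     # single forward pass: remember the most recent error event and keep a
--     # rolling window of the last three formatted stage strings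
--     err = None
--     window = []
--     for e in events:
--         if e.get("status") == "error":
--             err = e
--         window.append(f"{e.get('service')}/{e.get('stage')}")
--         if len(window) > 3:
--             window.pop(0)
--     if err is not None:
--         return f"Error at {err.get('service')}/{err.get('stage')}"
--     if not window:
--         return "No events"
--     return " \u2192 ".join(window)
-- ===== Notes on version B (the rewrite author's own statement) =====
-- stated objective: alternative
-- what changed: Replaces the staged passes (filter errors then index last; slice last three then map/format) by ONE forward fold that maintains an accumulator: the most recent error event and a rolling window of the last three formatted stage strings; the empty case falls out of the empty window.
import Mathlib
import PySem

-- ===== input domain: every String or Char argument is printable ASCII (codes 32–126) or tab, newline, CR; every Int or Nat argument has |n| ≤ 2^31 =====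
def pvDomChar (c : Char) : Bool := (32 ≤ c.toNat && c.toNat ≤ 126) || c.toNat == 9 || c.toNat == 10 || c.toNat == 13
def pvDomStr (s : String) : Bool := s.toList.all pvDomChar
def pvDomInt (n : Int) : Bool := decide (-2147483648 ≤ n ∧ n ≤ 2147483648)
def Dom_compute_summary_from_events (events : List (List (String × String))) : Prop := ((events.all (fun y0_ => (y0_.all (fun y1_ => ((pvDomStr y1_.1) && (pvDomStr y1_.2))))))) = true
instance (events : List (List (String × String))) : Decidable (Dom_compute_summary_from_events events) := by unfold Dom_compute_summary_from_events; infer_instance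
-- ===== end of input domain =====

-- B replaces A's staged passes (filter-then-last; slice-then-map) by one forward fold keeping the
-- most recent error event and a rolling window of the last three formatted stages (objective: alternative, same O(n)).


-- ===== PORT A =====
-- e.get(k) returns None when k is absent; the f-string renders None as "None"
def pvOptStr (o : Option String) : String :=
  match o with
  | none => "None"
  | some s => s

-- f"{e.get('service')}/{e.get('stage')}"
def pvStage (e : List (String × String)) : String :=
  pvOptStr ((PySem.Dict.mk e).get? "service") ++ "/" ++ pvOptStr ((PySem.Dict.mk e).get? "stage")

def compute_summary_from_events (events : List (List (String × String))) : String :=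
  if events.isEmpty then "No events"
  else
    let errors := events.filter (fun e => (PySem.Dict.mk e).get? "status" == some "error")
    if !errors.isEmpty then
      match PySem.List.pyGet? errors (-1) with
      | some last => "Error at " ++ pvStage last
      | none => ""   -- unreachable: errors is nonempty
    else
      PySem.Str.join " → " ((PySem.List.slice events (some (-3)) none).map pvStage)

-- ===== PORT B =====
-- one iteration of the loop body: update the latest-error accumulator, append the
-- formatted stage to the window, and pop the window's front when it exceeds 3
def pvStepB (st : Option (List (String × String)) × List String) (e : List (String × String)) :
    Option (List (String × String)) × List String :=
  let err := if (PySem.Dict.mk e).get? "status" == some "error" then some e else st.1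
  let w := st.2 ++ [pvStage e]
  (err, if w.length > 3 then w.drop 1 else w)

def compute_summary_from_events_alt (events : List (List (String × String))) : String :=
  let st := events.foldl pvStepB (none, [])
  match st.1 with
  | some e => "Error at " ++ pvStage e
  | none =>
    if st.2.isEmpty then "No events"
    else PySem.Str.join " → " st.2

-- ===== PRECONDITION & SPEC =====
def Spec_compute_summary_from_events (events : List (List (String × String))) (out : String) : Prop := out = compute_summary_from_events_alt events
instance (events : List (List (String × String))) (out : String) : Decidable (Spec_compute_summary_from_events events out) := by unfold Spec_compute_summary_from_events; infer_instance

-- ===== CLAIM =====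
def Claim_equal_compute_summary_from_events : Prop := ∀ (events : List (List (String × String))), Dom_compute_summary_from_events events → Spec_compute_summary_from_events events (compute_summary_from_events events)

-- ===== LEMMAS AND PROOFS =====

-- appending one stage and popping the front keeps the window = last three elements
theorem pvTail3_step (xs : List String) (x : String) :
    (if (xs.drop (xs.length - 3) ++ [x]).length > 3
       then (xs.drop (xs.length - 3) ++ [x]).drop 1
       else xs.drop (xs.length - 3) ++ [x])
      = (xs ++ [x]).drop ((xs ++ [x]).length - 3) := by
  by_cases h3 : 3 ≤ xs.length
  · rw [if_pos (by simp [List.length_append, List.length_drop]; omega)]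
    rw [List.drop_append_of_le_length (by simp [List.length_drop]; omega),
        List.drop_drop]
    have he : xs.length - 3 + 1 = (xs ++ [x]).length - 3 := by simp; omega
    rw [he, List.drop_append_of_le_length (by simp)]
  · have h0 : xs.length - 3 = 0 := by omega
    rw [if_neg (by simp [h0, List.length_append]; omega)]
    have h2 : xs.length - 2 = 0 := by omega
    simp [h0, h2]

-- the fold's state: latest error = last of the filtered list, window = last ≤3 formatted stages
theorem pvFold_char (l : List (List (String × String))) :
    l.foldl pvStepB (none, [])
      = ((l.filter (fun e => (PySem.Dict.mk e).get? "status" == some "error")).getLast?,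
         (l.map pvStage).drop ((l.map pvStage).length - 3)) := by
  induction l using List.reverseRecOn with
  | nil => rfl
  | append_singleton m a ih =>
      rw [List.foldl_append, ih]
      simp only [List.foldl_cons, List.foldl_nil]
      unfold pvStepB
      refine Prod.ext ?_ ?_
      · -- error component
        by_cases hp : ((PySem.Dict.mk a).get? "status" == some "error") = true
        · simp [hp, List.filter_append, List.getLast?_append]
        · simp [hp, List.filter_append]
      · -- window component
        simp only [List.map_append, List.map_cons, List.map_nil]
        exact pvTail3_step (m.map pvStage) (pvStage a)

-- ===== VERDICT =====
theorem compute_summary_from_events_spec : Claim_equal_compute_summary_from_events := by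
  intro events _
  unfold Spec_compute_summary_from_events compute_summary_from_events compute_summary_from_events_alt
  rw [pvFold_char]
  by_cases h : events.isEmpty
  · have : events = [] := List.isEmpty_iff.mp h
    subst this; rfl
  · have hne : events ≠ [] := by simpa [List.isEmpty_iff] using h
    simp only [h, Bool.false_eq_true, if_false]
    cases hf : (events.filter (fun e => (PySem.Dict.mk e).get? "status" == some "error")).getLast? with
    | some last =>
        have hnee : (events.filter (fun e => (PySem.Dict.mk e).get? "status" == some "error")).isEmpty = false := by
          cases hl : events.filter (fun e => (PySem.Dict.mk e).get? "status" == some "error") with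
          | nil => rw [hl] at hf; simp at hf
          | cons x xs => simp
        simp [hnee, PySem.List.pyGet?_neg_one, hf]
    | none =>
        have hfe : events.filter (fun e => (PySem.Dict.mk e).get? "status" == some "error") = [] := by
          cases hl : events.filter (fun e => (PySem.Dict.mk e).get? "status" == some "error") with
          | nil => rfl
          | cons x xs => rw [hl] at hf; simp [List.getLast?] at hf
        have hpos : 0 < events.length := List.length_pos_of_ne_nil hne
        rw [PySem.List.slice_from_neg_ofNat events 3 (by omega)]
        simp [hfe, List.map_drop, List.length_map]
        intro hc
        exact absurd hc (by omega)
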